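-- pv_equiv track=rewrite | github.com/mam288/bioinformatics-VI | wk2_04_bw_matching.py | number_characters
-- ===== SOURCE A (Python) =====
-- def number_characters(seq):
--     '''
--     Used with bw_to_string.
--     Takes a given seq and returns a list of the same length with each element being a tuple (c,n). "c" is
--     the character at the matching index  in seq, and "n" is the occurance number of that character.
--     For example, ('A',3) would be the third occurance of 'A'.
--     '''
--     numbered_char_list = [('',-1) for i in range(len(seq))]
--     completed_chars = []
--     for char in seq:
--         indices = [index for (index, character) in enumerate(seq) if character == char]
--         if char not in completed_chars:
--             count = 1
--             for index in indices:
--                 numbered_char_list[index] = (char,count)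
--                 count += 1
--             completed_chars += [char]
--     return numbered_char_list
-- ===== SOURCE B (Python) =====
-- def number_characters(seq):
--     counts = {}
--     result = []
--     for char in seq:
--         counts[char] = counts.get(char, 0) + 1
--         result.append((char, counts[char]))
--     return result
-- ===== Notes on version B (the rewrite author's own statement) =====
-- stated objective: faster
-- what changed: Replaced A's pre-allocated placeholder list with per-character enumerate scans and a completed_chars guard by a single forward pass that maintains a running occurrence counter in a dict and appends each labelled pair directly.
import Mathlib
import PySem

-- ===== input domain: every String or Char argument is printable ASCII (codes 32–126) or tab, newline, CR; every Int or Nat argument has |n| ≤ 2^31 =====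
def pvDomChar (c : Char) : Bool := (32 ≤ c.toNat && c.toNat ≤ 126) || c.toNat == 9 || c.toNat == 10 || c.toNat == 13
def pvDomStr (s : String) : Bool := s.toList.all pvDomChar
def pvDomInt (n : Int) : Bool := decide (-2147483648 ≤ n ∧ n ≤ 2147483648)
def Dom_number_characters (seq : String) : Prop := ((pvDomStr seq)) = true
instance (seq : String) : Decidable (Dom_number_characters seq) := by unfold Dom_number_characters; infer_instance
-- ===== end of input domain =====

-- B replaces A's quadratic rescanning (enumerate scan per character plus a completed_chars
-- guard) by a single forward pass keeping a running occurrence counter in a dict.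

-- ===== PORT A =====
def number_characters (seq : String) : List (String × Int) :=
  let cs := seq.toList
  let init : List (String × Int) := (List.range cs.length).map (fun _ => ("", (-1 : Int)))
  (cs.foldl
    (fun (st : List (String × Int) × List Char) char =>
      let indices : List Int :=
        ((PySem.List.enumerate cs).filter (fun p => p.2 == char)).map (·.1)
      if char ∉ st.2 then
        let res := indices.foldl
          (fun (st2 : List (String × Int) × Int) index =>
            (PySem.List.pySetD st2.1 index (String.singleton char, st2.2), st2.2 + 1))
          (st.1, 1)
        (res.1, st.2 ++ [char])
      else st)
    (init, [])).1

-- ===== PORT B =====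
def number_characters_alt (seq : String) : List (String × Int) :=
  (seq.toList.foldl
    (fun (st : PySem.Dict Char Int × List (String × Int)) char =>
      let n := st.1.getD char 0 + 1
      (st.1.insert char n, st.2 ++ [(String.singleton char, n)]))
    (PySem.Dict.empty, [])).2

-- ===== PRECONDITION & SPEC =====
def Spec_number_characters (seq : String) (out : List (String × Int)) : Prop := out = number_characters_alt seq
instance (seq : String) (out : List (String × Int)) : Decidable (Spec_number_characters seq out) := by unfold Spec_number_characters; infer_instance

-- ===== CLAIM (what is proved, stated in full; the proofs are below) =====
def Claim_equal_number_characters : Prop := ∀ (seq : String), Dom_number_characters seq → Spec_number_characters seq (number_characters seq)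

-- ===== LEMMAS AND PROOFS =====

-- running-count specification: pvSpec pre rest labels each char of rest with (count so far) + 1
def pvSpec (pre rest : List Char) : List (String × Int) :=
  match rest with
  | [] => []
  | c :: rs => (String.singleton c, (pre.count c : Int) + 1) :: pvSpec (pre ++ [c]) rs

theorem pvSpec_length (rest : List Char) : ∀ pre, (pvSpec pre rest).length = rest.length := by
  induction rest with
  | nil => intro pre; rfl
  | cons c rs ih => intro pre; simp [pvSpec, ih]

theorem pvSpec_getElem? (rest : List Char) : ∀ (pre : List Char) (k : Nat) (h : k < rest.length),
    (pvSpec pre rest)[k]? =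
      some (String.singleton rest[k], ((pre ++ rest.take k).count rest[k] : Int) + 1) := by
  induction rest with
  | nil => intro pre k h; simp at h
  | cons c rs ih =>
    intro pre k h
    cases k with
    | zero => simp [pvSpec]
    | succ k =>
      have h' : k < rs.length := by simpa using h
      simpa [pvSpec, List.append_assoc] using ih (pre ++ [c]) k h'

theorem count_take_succ (cs : List Char) (k : Nat) (h : k < cs.length) :
    (cs.take (k + 1)).count cs[k] = (cs.take k).count cs[k] + 1 := by
  rw [List.take_succ_eq_append_getElem h]
  rw [List.count_append]
  simp

-- ===== B equals pvSpec =====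
theorem B_inv (rest : List Char) : ∀ (pre : List Char) (d : PySem.Dict Char Int)
    (out : List (String × Int)),
    (∀ c, d.getD c 0 = (pre.count c : Int)) →
    (rest.foldl
      (fun (st : PySem.Dict Char Int × List (String × Int)) char =>
        let n := st.1.getD char 0 + 1
        (st.1.insert char n, st.2 ++ [(String.singleton char, n)]))
      (d, out)).2 = out ++ pvSpec pre rest := by
  induction rest with
  | nil => intro pre d out _; simp [pvSpec]
  | cons c rs ih =>
    intro pre d out hd
    simp only [List.foldl_cons]
    rw [ih (pre ++ [c]) _ _ ?_]
    · simp [pvSpec, hd c]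
    · intro c'
      rw [PySem.Dict.getD_insert]
      by_cases hc : c' = c
      · subst hc; simp [hd c']
      · simp [hc, hd c', Ne.symm hc]

theorem B_eq_pvSpec (seq : String) : number_characters_alt seq = pvSpec [] seq.toList := by
  unfold number_characters_alt
  rw [B_inv seq.toList [] PySem.Dict.empty [] (fun c => by simp [PySem.Dict.getD_empty])]
  simp

-- ===== inner write loop of A =====
theorem W_inv (s : String) (idxs : List Int) : ∀ (lst : List (String × Int)) (c0 : Int),
    (∀ i ∈ idxs, 0 ≤ i ∧ i.toNat < lst.length) → idxs.Pairwise (· < ·) →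
    (idxs.foldl
        (fun (st2 : List (String × Int) × Int) index =>
          (PySem.List.pySetD st2.1 index (s, st2.2), st2.2 + 1)) (lst, c0)).1.length = lst.length ∧
    ∀ (k : Nat) (hk : k < lst.length),
      (idxs.foldl
        (fun (st2 : List (String × Int) × Int) index =>
          (PySem.List.pySetD st2.1 index (s, st2.2), st2.2 + 1)) (lst, c0)).1[k]? =
        some (if (k : Int) ∈ idxs then (s, c0 + (idxs.idxOf (k : Int) : Int)) else lst[k]) := by
  induction idxs with
  | nil =>
    intro lst c0 _ _
    exact ⟨rfl, by intro k hk; simp [List.getElem?_eq_getElem hk]⟩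
  | cons j rest ih =>
    intro lst c0 hb hp
    obtain ⟨hj0, hjl⟩ := hb j (by simp)
    have hset : PySem.List.pySetD lst j (s, c0) = lst.set j.toNat (s, c0) :=
      PySem.List.pySetD_of_nonneg lst (s, c0) hj0
    have hlen' : (lst.set j.toNat (s, c0)).length = lst.length := by simp
    have hb' : ∀ i ∈ rest, 0 ≤ i ∧ i.toNat < (lst.set j.toNat (s, c0)).length := by
      intro i hi; rw [hlen']; exact hb i (by simp [hi])
    have hjr : ∀ i ∈ rest, j < i := (List.pairwise_cons.mp hp).1
    obtain ⟨ihlen, ihget⟩ := ih (lst.set j.toNat (s, c0)) (c0 + 1) hb'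
      (List.pairwise_cons.mp hp).2
    simp only [List.foldl_cons, hset]
    refine ⟨by rw [ihlen, hlen'], ?_⟩
    intro k hk
    have hk' : k < (lst.set j.toNat (s, c0)).length := by rw [hlen']; exact hk
    rw [ihget k hk']
    by_cases hkj : (k : Int) = j
    · have hknat : j.toNat = k := by omega
      have hknr : (k : Int) ∉ rest := fun hmem => absurd (hjr _ hmem) (by omega)
      have hmem : (k : Int) ∈ j :: rest := by simp [hkj]
      have hidx : (j :: rest).idxOf (k : Int) = 0 := by
        simp [List.idxOf, List.findIdx_cons, hkj.symm]
      simp only [hknr, if_false, hmem, if_true, hidx]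
      simp [List.getElem_set, hknat]
    · by_cases hkr : (k : Int) ∈ rest
      · have hmem : (k : Int) ∈ j :: rest := by simp [hkr]
        have hjk : (j == (k : Int)) = false := by simp [Ne.symm hkj]
        have hidx : (j :: rest).idxOf (k : Int) = rest.idxOf (k : Int) + 1 := by
          simp [List.idxOf, List.findIdx_cons, hjk]
        simp only [hkr, if_true, hmem, if_true, hidx]
        push_cast
        ring_nf
      · have hmem : (k : Int) ∉ j :: rest := by simp [hkj, hkr]
        simp only [hkr, if_false, hmem, if_false]
        rw [List.getElem_set_ne (by omega)]

-- ===== the index list A builds for a character =====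
theorem idxs_mem (cs : List Char) (char : Char) (x : Int) :
    (x ∈ ((PySem.List.enumerate cs).filter (fun p => p.2 == char)).map (·.1)) ↔
      ∃ (k : Nat) (h : k < cs.length), x = (k : Int) ∧ cs[k] = char := by
  simp only [List.mem_map, List.mem_filter, PySem.List.mem_enumerate_iff]
  constructor
  · rintro ⟨p, ⟨⟨k, hkl, rfl⟩, hc⟩, rfl⟩
    exact ⟨k, hkl, by simpa using hc.symm ▸ rfl, by simpa using hc⟩
  · rintro ⟨k, hkl, rfl, hc⟩
    exact ⟨((k : Int), cs[k]), ⟨⟨k, hkl, by simp⟩, by simp [hc]⟩, rfl⟩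

theorem idxs_pairwise (cs : List Char) (char : Char) :
    (((PySem.List.enumerate cs).filter (fun p => p.2 == char)).map (·.1)).Pairwise (· < ·) := by
  rw [List.pairwise_map]
  exact (PySem.List.pairwise_lt_enumerate cs 0).filter _

theorem idxs_idxOf (cs : List Char) : ∀ (st : Int) (char : Char) (k : Nat) (h : k < cs.length),
    cs[k] = char →
    (((PySem.List.enumerate cs st).filter (fun p => p.2 == char)).map (·.1)).idxOf (st + k) =
      (cs.take k).count char := by
  induction cs with
  | nil => intro st char k h; simp at h
  | cons c cs' ih =>
    intro st char k h hck
    rw [PySem.List.enumerate_cons]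
    by_cases hc : c = char
    · have hfil : (((st, c) :: PySem.List.enumerate cs' (st + 1)).filter (fun p => p.2 == char)) =
          (st, c) :: (PySem.List.enumerate cs' (st + 1)).filter (fun p => p.2 == char) := by
        simp [List.filter_cons, hc]
      rw [hfil, List.map_cons]
      cases k with
      | zero => simp [List.idxOf, List.findIdx_cons]
      | succ k =>
        have hne : (st == st + (k + 1 : Nat)) = false := by
          simp; omega
        have hk' : k < cs'.length := by simpa using h
        have hck' : cs'[k] = char := by simpa using hck
        have harg : st + ((k : Nat) + 1 : Nat) = (st + 1) + (k : Nat) := by push_cast; ring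
        simp only [List.idxOf, List.findIdx_cons, hne, cond_false]
        have := ih (st + 1) char k hk' hck'
        simp only [List.idxOf] at this
        rw [harg, this]
        simp [List.take_succ_cons, List.count_cons, hc]
    · have hfil : (((st, c) :: PySem.List.enumerate cs' (st + 1)).filter (fun p => p.2 == char)) =
          (PySem.List.enumerate cs' (st + 1)).filter (fun p => p.2 == char) := by
        simp [List.filter_cons, hc]
      rw [hfil]
      cases k with
      | zero => simp at hck; exact absurd hck hc
      | succ k =>
        have hk' : k < cs'.length := by simpa using h
        have hck' : cs'[k] = char := by simpa using hck
        have harg : st + ((k : Nat) + 1 : Nat) = (st + 1) + (k : Nat) := by push_cast; ring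
        rw [harg, ih (st + 1) char k hk' hck']
        simp [List.take_succ_cons, List.count_cons, hc]


-- the write loop of A for one character, with its concrete index list
theorem Wspec (cs : List Char) (char : Char) (lst : List (String × Int))
    (hl : lst.length = cs.length) :
    ((((PySem.List.enumerate cs).filter (fun p => p.2 == char)).map (·.1)).foldl
        (fun (st2 : List (String × Int) × Int) index =>
          (PySem.List.pySetD st2.1 index (String.singleton char, st2.2), st2.2 + 1))
        (lst, 1)).1.length = lst.length ∧
    ∀ (k : Nat) (hk : k < cs.length),
      ((((PySem.List.enumerate cs).filter (fun p => p.2 == char)).map (·.1)).foldl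
        (fun (st2 : List (String × Int) × Int) index =>
          (PySem.List.pySetD st2.1 index (String.singleton char, st2.2), st2.2 + 1))
        (lst, 1)).1[k]? =
        some (if cs[k] = char
          then (String.singleton char, ((cs.take (k + 1)).count char : Int))
          else lst[k]'(by rw [hl]; exact hk)) := by
  have hb : ∀ i ∈ ((PySem.List.enumerate cs).filter (fun p => p.2 == char)).map (·.1),
      0 ≤ i ∧ i.toNat < lst.length := by
    intro i hi
    obtain ⟨k, hkl, rfl, _⟩ := (idxs_mem cs char i).mp hi
    constructor
    · omega
    · rw [hl]; simpa using hkl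
  obtain ⟨L, G⟩ := W_inv (String.singleton char)
    (((PySem.List.enumerate cs).filter (fun p => p.2 == char)).map (·.1)) lst 1 hb
    (idxs_pairwise cs char)
  refine ⟨L, ?_⟩
  intro k hk
  rw [G k (by rw [hl]; exact hk)]
  by_cases hc : cs[k] = char
  · have hmem : (k : Int) ∈ ((PySem.List.enumerate cs).filter (fun p => p.2 == char)).map (·.1) :=
      (idxs_mem cs char (k : Int)).mpr ⟨k, hk, rfl, hc⟩
    have hidx := idxs_idxOf cs 0 char k hk hc
    rw [zero_add] at hidx
    simp only [hmem, if_true, hc, if_pos]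
    rw [hidx]
    have := count_take_succ cs k hk
    rw [hc] at this
    rw [this]
    push_cast
    ring_nf
  · have hmem : (k : Int) ∉ ((PySem.List.enumerate cs).filter (fun p => p.2 == char)).map (·.1) := by
      intro hmem
      obtain ⟨k', hk', hkk, hck'⟩ := (idxs_mem cs char (k : Int)).mp hmem
      have : k = k' := by omega
      exact hc (this ▸ hck')
    simp [hmem, hc]

-- invariant of A's outer loop
theorem O_inv (cs : List Char) (rest : List Char) : ∀ (lst : List (String × Int))
    (done pre : List Char),
    lst.length = cs.length →
    (∀ c, c ∈ done ↔ c ∈ pre) →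
    (∀ (k : Nat) (hk : k < cs.length), lst[k]? =
      some (if cs[k] ∈ pre then (String.singleton cs[k], ((cs.take (k + 1)).count cs[k] : Int))
            else ("", -1))) →
    ((rest.foldl
        (fun (st : List (String × Int) × List Char) char =>
          let indices : List Int :=
            ((PySem.List.enumerate cs).filter (fun p => p.2 == char)).map (·.1)
          if char ∉ st.2 then
            let res := indices.foldl
              (fun (st2 : List (String × Int) × Int) index =>
                (PySem.List.pySetD st2.1 index (String.singleton char, st2.2), st2.2 + 1))
              (st.1, 1)
            (res.1, st.2 ++ [char])
          else st)
        (lst, done)).1.length = cs.length ∧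
     ∀ (k : Nat) (hk : k < cs.length),
       ((rest.foldl
        (fun (st : List (String × Int) × List Char) char =>
          let indices : List Int :=
            ((PySem.List.enumerate cs).filter (fun p => p.2 == char)).map (·.1)
          if char ∉ st.2 then
            let res := indices.foldl
              (fun (st2 : List (String × Int) × Int) index =>
                (PySem.List.pySetD st2.1 index (String.singleton char, st2.2), st2.2 + 1))
              (st.1, 1)
            (res.1, st.2 ++ [char])
          else st)
        (lst, done)).1[k]? =
        some (if cs[k] ∈ pre ++ rest
          then (String.singleton cs[k], ((cs.take (k + 1)).count cs[k] : Int))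
          else ("", -1)))) := by
  induction rest with
  | nil =>
    intro lst done pre h1 _ h3
    exact ⟨h1, by simpa using h3⟩
  | cons char rs ih =>
    intro lst done pre h1 h2 h3
    simp only [List.foldl_cons]
    by_cases hmem : char ∈ done
    · rw [if_neg (not_not_intro hmem)]
      have hcp : char ∈ pre := (h2 char).mp hmem
      have h2' : ∀ c, c ∈ done ↔ c ∈ pre ++ [char] := by
        intro c
        simp only [List.mem_append, List.mem_singleton]
        constructor
        · intro hc; exact Or.inl ((h2 c).mp hc)
        · rintro (hc | rfl)
          · exact (h2 c).mpr hc
          · exact hmem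
      have h3' : ∀ (k : Nat) (hk : k < cs.length), lst[k]? =
          some (if cs[k] ∈ pre ++ [char]
            then (String.singleton cs[k], ((cs.take (k + 1)).count cs[k] : Int)) else ("", -1)) := by
        intro k hk
        rw [h3 k hk]
        have hiff : (cs[k] ∈ pre) ↔ cs[k] ∈ pre ++ [char] := by
          simp only [List.mem_append, List.mem_singleton]
          constructor
          · exact Or.inl
          · rintro (hc | rfl)
            · exact hc
            · exact hcp
        rw [if_congr hiff rfl rfl]
      have := ih lst done (pre ++ [char]) h1 h2' h3'
      rwa [List.append_assoc, List.singleton_append] at this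
    · rw [if_pos hmem]
      obtain ⟨WL, WG⟩ := Wspec cs char lst h1
      have hcp : char ∉ pre := fun hc => hmem ((h2 char).mpr hc)
      have h2' : ∀ c, c ∈ done ++ [char] ↔ c ∈ pre ++ [char] := by
        intro c; simp [h2 c]
      have h3' : ∀ (k : Nat) (hk : k < cs.length),
          ((((PySem.List.enumerate cs).filter (fun p => p.2 == char)).map (·.1)).foldl
            (fun (st2 : List (String × Int) × Int) index =>
              (PySem.List.pySetD st2.1 index (String.singleton char, st2.2), st2.2 + 1))
            (lst, 1)).1[k]? =
          some (if cs[k] ∈ pre ++ [char]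
            then (String.singleton cs[k], ((cs.take (k + 1)).count cs[k] : Int)) else ("", -1)) := by
        intro k hk
        rw [WG k hk]
        by_cases hck : cs[k] = char
        · simp [hck]
        · have hlk : lst[k]'(by rw [h1]; exact hk) =
              if cs[k] ∈ pre then (String.singleton cs[k], ((cs.take (k + 1)).count cs[k] : Int))
              else ("", -1) := by
            have h := h3 k hk
            rwa [List.getElem?_eq_getElem (by rw [h1]; exact hk), Option.some_inj] at h
          rw [if_neg hck, hlk]
          have hiff : (cs[k] ∈ pre) ↔ cs[k] ∈ pre ++ [char] := by
            simp [List.mem_append, hck]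
          rw [if_congr hiff rfl rfl]
      have := ih _ (done ++ [char]) (pre ++ [char]) (by rw [WL, h1]) h2' h3'
      rwa [List.append_assoc, List.singleton_append] at this

-- the pointwise characterisation of A's result
theorem A_char (seq : String) :
    (number_characters seq).length = seq.toList.length ∧
    ∀ (k : Nat) (hk : k < seq.toList.length),
      (number_characters seq)[k]? =
        some (String.singleton seq.toList[k],
              ((seq.toList.take (k + 1)).count seq.toList[k] : Int)) := by
  have h := O_inv seq.toList seq.toList
    ((List.range seq.toList.length).map (fun _ => ("", (-1 : Int)))) [] []
    (by simp)
    (by intro c; simp)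
    (by
      intro k hk
      have hk' : k < seq.length := by simpa using hk
      simp [List.getElem?_replicate, hk'])
  refine ⟨h.1, ?_⟩
  intro k hk
  have hg := h.2 k hk
  simp only [List.nil_append, List.getElem_mem, if_true] at hg
  exact hg

theorem A_eq_B (seq : String) : number_characters seq = number_characters_alt seq := by
  obtain ⟨hL, hG⟩ := A_char seq
  rw [B_eq_pvSpec]
  apply List.ext_getElem?
  intro k
  by_cases hk : k < seq.toList.length
  · rw [hG k hk, pvSpec_getElem? seq.toList [] k hk]
    simp only [List.nil_append, Option.some_inj]
    have := count_take_succ seq.toList k hk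
    rw [Prod.ext_iff]
    refine ⟨rfl, ?_⟩
    simp only []
    rw [this]
    push_cast
    ring
  · rw [List.getElem?_eq_none (show (number_characters seq).length ≤ k by rw [hL]; omega),
        List.getElem?_eq_none (show (pvSpec [] seq.toList).length ≤ k by rw [pvSpec_length]; omega)]

-- ===== VERDICT (by name: the statement is the Claim_ definition above) =====
theorem number_characters_spec : Claim_equal_number_characters := by
  intro seq _
  unfold Spec_number_characters
  exact A_eq_B seq
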